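-- pv_equiv track=rewrite | github.com/minimal-pair/SubtitleMixer | app.py | create_subtitle_list
-- ===== SOURCE A (Python) =====
-- def create_subtitle_list(lines: list):
--     subtitle_list = [[]]
--     for line in lines:
--         if line == '\n':
--             subtitle_list.append([])
--         else:
--             subtitle_list[-1].append(line)
--     return subtitle_list
-- ===== SOURCE B (Python) =====
-- def create_subtitle_list(lines: list):
--     seps = [i for i, line in enumerate(lines) if line == '\n']
--     groups = []
--     prev = 0
--     for i in seps:
--         groups.append(lines[prev:i])
--         prev = i + 1
--     groups.append(lines[prev:])
--     return groups
-- ===== Notes on version B (the rewrite author's own statement) =====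
-- stated objective: alternative
-- what changed: Replaces the single accumulate-into-last-group pass by a find-separators-then-slice decomposition: first collect the indices of blank lines, then emit the slices between consecutive separators.
import Mathlib
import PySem

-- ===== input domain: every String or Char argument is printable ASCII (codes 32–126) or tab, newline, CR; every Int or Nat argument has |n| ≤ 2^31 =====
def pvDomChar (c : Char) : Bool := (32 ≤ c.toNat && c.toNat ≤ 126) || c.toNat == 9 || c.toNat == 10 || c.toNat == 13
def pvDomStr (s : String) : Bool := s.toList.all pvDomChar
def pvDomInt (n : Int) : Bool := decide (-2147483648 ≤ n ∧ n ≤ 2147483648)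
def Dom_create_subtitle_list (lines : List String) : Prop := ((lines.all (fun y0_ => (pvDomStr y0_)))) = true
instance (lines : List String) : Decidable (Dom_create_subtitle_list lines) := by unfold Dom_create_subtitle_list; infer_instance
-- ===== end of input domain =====

-- B replaces A's accumulate-into-last-group pass by a find-separator-indices-then-slice
-- decomposition (objective: alternative); return values are proved equal on all inputs.


-- ===== PORT A =====
-- one loop step: '\n' appends a fresh empty group, otherwise append to the last group
def stepA (sl : List (List String)) (line : String) : List (List String) :=
  if line == "\n" then sl ++ [[]]
  else sl.dropLast ++ [(sl.getLast?.getD []) ++ [line]]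

def create_subtitle_list (lines : List String) : List (List String) :=
  List.foldl stepA [[]] lines

-- ===== PORT B =====
def create_subtitle_list_alt (lines : List String) : List (List String) :=
  let seps : List Int :=
    ((PySem.List.enumerate lines).filter (fun p => p.2 == "\n")).map Prod.fst
  let st := seps.foldl
    (fun (st : List (List String) × Int) i =>
      (st.1 ++ [PySem.List.slice lines (some st.2) (some i)], i + 1))
    ([], 0)
  st.1 ++ [PySem.List.slice lines (some st.2) none]

-- ===== PRECONDITION & SPEC =====
def Spec_create_subtitle_list (lines : List String) (out : List (List String)) : Prop := out = create_subtitle_list_alt lines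
instance (lines : List String) (out : List (List String)) : Decidable (Spec_create_subtitle_list lines out) := by unfold Spec_create_subtitle_list; infer_instance

-- ===== CLAIM (what is proved, stated in full; the proofs are below) =====
def Claim_equal_create_subtitle_list : Prop := ∀ (lines : List String), Dom_create_subtitle_list lines → Spec_create_subtitle_list lines (create_subtitle_list lines)

-- ===== LEMMAS AND PROOFS =====

-- structural characterisation of the grouping both programs compute
def fSpec : List String → List (List String)
  | [] => [[]]
  | l :: t =>
    if l = "\n" then [] :: fSpec t
    else
      match fSpec t with
      | [] => [[l]]
      | g :: gs => (l :: g) :: gs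

theorem fSpec_ne_nil (t : List String) : fSpec t ≠ [] := by
  cases t with
  | nil => simp [fSpec]
  | cons l t =>
    simp only [fSpec]
    split
    · simp
    · cases h : fSpec t <;> simp

-- ---- A-side ----

theorem foldlA (t : List String) : ∀ (pre : List (List String)) (cur : List String),
    List.foldl stepA (pre ++ [cur]) t
      = pre ++ (match fSpec t with | [] => [cur] | g :: gs => (cur ++ g) :: gs) := by
  induction t with
  | nil => intro pre cur; simp [fSpec]
  | cons l t ih =>
    intro pre cur
    by_cases hl : l = "\n"
    · subst hl
      have h1 : stepA (pre ++ [cur]) "\n" = (pre ++ [cur]) ++ [[]] := by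
        simp [stepA]
      rw [List.foldl_cons, h1, ih (pre ++ [cur]) []]
      cases h : fSpec t with
      | nil => exact absurd h (fSpec_ne_nil t)
      | cons g gs => simp [fSpec, h]
    · have h1 : stepA (pre ++ [cur]) l = pre ++ [cur ++ [l]] := by
        simp [stepA, hl]
      rw [List.foldl_cons, h1, ih pre (cur ++ [l])]
      cases h : fSpec t with
      | nil => exact absurd h (fSpec_ne_nil t)
      | cons g gs => simp [fSpec, h, hl]

theorem A_eq_fSpec (lines : List String) : create_subtitle_list lines = fSpec lines := by
  have := foldlA lines [] []
  simp only [List.nil_append] at this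
  rw [create_subtitle_list, this]
  cases h : fSpec lines with
  | nil => exact absurd h (fSpec_ne_nil lines)
  | cons g gs => simp

-- ---- B-side ----

-- the blank-line indices, computed structurally
def sepsN : List String → List Nat
  | [] => []
  | x :: t => if x = "\n" then 0 :: (sepsN t).map (· + 1) else (sepsN t).map (· + 1)

-- the slicing loop of B, over Nat indices and drop/take slices
def sliceFold (xs : List String) (ss : List Nat) (acc : List (List String)) (p : Nat) :
    List (List String) × Nat :=
  ss.foldl (fun st i => (st.1 ++ [(xs.drop st.2).take (i - st.2)], i + 1)) (acc, p)

theorem sliceFold_nil (xs : List String) (acc : List (List String)) (p : Nat) :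
    sliceFold xs [] acc p = (acc, p) := rfl

theorem sliceFold_cons (xs : List String) (i : Nat) (ss : List Nat)
    (acc : List (List String)) (p : Nat) :
    sliceFold xs (i :: ss) acc p
      = sliceFold xs ss (acc ++ [(xs.drop p).take (i - p)]) (i + 1) := rfl

theorem sepsN_spec (t : List String) : ∀ (s : Int),
    ((PySem.List.enumerate t s).filter (fun p => p.2 == "\n")).map Prod.fst
      = (sepsN t).map (fun k : Nat => s + (k : Int)) := by
  induction t with
  | nil => intro s; simp [PySem.List.enumerate_nil, sepsN]
  | cons x t ih =>
    intro s
    rw [PySem.List.enumerate_cons]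
    by_cases hx : x = "\n"
    · subst hx
      simp only [List.filter_cons, BEq.rfl, if_true, List.map_cons, ih (s + 1), sepsN,
        List.map_map]
      congr 1
      · simp
      · apply List.map_congr_left
        intro k _
        simp [Function.comp]
        ring
    · simp only [sepsN, hx, List.filter_cons]
      simp only [beq_iff_eq, hx, if_false]
      rw [ih (s + 1), List.map_map]
      apply List.map_congr_left
      intro k _
      simp
      ring

theorem castFold (xs : List String) : ∀ (ss : List Nat) (acc : List (List String)) (p : Nat),
    List.foldl (fun (st : List (List String) × Int) i =>
        (st.1 ++ [PySem.List.slice xs (some st.2) (some i)], i + 1))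
      (acc, (p : Int)) (ss.map (fun k : Nat => (k : Int)))
      = ((sliceFold xs ss acc p).1, ((sliceFold xs ss acc p).2 : Int)) := by
  intro ss
  induction ss with
  | nil => intro acc p; simp [sliceFold_nil]
  | cons i ss ih =>
    intro acc p
    rw [List.map_cons, List.foldl_cons, sliceFold_cons]
    have hslice : PySem.List.slice xs (some (p : Int)) (some (i : Int))
        = (xs.drop p).take (i - p) := PySem.List.slice_natCast xs p i
    rw [hslice]
    have : ((i : Int) + 1) = ((i + 1 : Nat) : Int) := by push_cast; ring
    rw [this, ih]

theorem sliceFold_acc (xs : List String) : ∀ (ss : List Nat) (acc : List (List String)) (p : Nat),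
    sliceFold xs ss acc p
      = (acc ++ (sliceFold xs ss [] p).1, (sliceFold xs ss [] p).2) := by
  intro ss
  induction ss with
  | nil => intro acc p; simp [sliceFold_nil]
  | cons i ss ih =>
    intro acc p
    rw [sliceFold_cons, sliceFold_cons, ih (acc ++ _), ih ([] ++ _)]
    simp

theorem sliceFold_shift (x : String) (t : List String) :
    ∀ (ss : List Nat) (acc : List (List String)) (p : Nat),
    sliceFold (x :: t) (ss.map (· + 1)) acc (p + 1)
      = ((sliceFold t ss acc p).1, (sliceFold t ss acc p).2 + 1) := by
  intro ss
  induction ss with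
  | nil => intro acc p; simp [sliceFold_nil]
  | cons i ss ih =>
    intro acc p
    rw [List.map_cons, sliceFold_cons, sliceFold_cons]
    have h1 : ((x :: t).drop (p + 1)).take (i + 1 - (p + 1)) = (t.drop p).take (i - p) := by
      simp
    rw [h1, ih]

-- B rewritten into the Nat slicing loop
def altN (lines : List String) : List (List String) :=
  let r := sliceFold lines (sepsN lines) [] 0
  r.1 ++ [lines.drop r.2]

theorem alt_eq_altN (lines : List String) : create_subtitle_list_alt lines = altN lines := by
  rw [create_subtitle_list_alt, altN]
  have hseps : ((PySem.List.enumerate lines).filter (fun p => p.2 == "\n")).map Prod.fst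
      = (sepsN lines).map (fun k : Nat => (k : Int)) := by
    rw [sepsN_spec lines 0]
    apply List.map_congr_left
    intro k _
    simp
  simp only [hseps]
  have h0 : (0 : Int) = ((0 : Nat) : Int) := rfl
  rw [h0, castFold]
  rw [PySem.List.slice_from_natCast]

theorem altN_eq_fSpec (lines : List String) : altN lines = fSpec lines := by
  induction lines with
  | nil => simp [altN, sepsN, sliceFold_nil, fSpec]
  | cons x t ih =>
    by_cases hx : x = "\n"
    · subst hx
      rw [altN, sepsN, if_pos rfl, sliceFold_cons]
      simp only [Nat.sub_self, List.take_zero, List.nil_append]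
      have hsh : sliceFold ("\n" :: t) ((sepsN t).map (· + 1)) [[]] 1
          = ((sliceFold t (sepsN t) [[]] 0).1, (sliceFold t (sepsN t) [[]] 0).2 + 1) := by
        simpa using sliceFold_shift "\n" t (sepsN t) [[]] 0
      rw [hsh, sliceFold_acc t (sepsN t) [[]] 0]
      simp only [fSpec, ← ih, altN]
      simp
    · rw [altN, sepsN, if_neg hx]
      cases hs : sepsN t with
      | nil =>
        rw [List.map_nil, sliceFold_nil]
        simp only [fSpec, if_neg hx, ← ih, altN, hs, sliceFold_nil]
        simp
      | cons i rest =>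
        rw [List.map_cons, sliceFold_cons]
        have h1 : (((x :: t).drop 0).take (i + 1 - 0)) = x :: t.take i := by simp
        rw [h1]
        have hsh : sliceFold (x :: t) ((rest).map (· + 1)) [x :: t.take i] (i + 1 + 1)
            = ((sliceFold t rest [x :: t.take i] (i + 1)).1,
               (sliceFold t rest [x :: t.take i] (i + 1)).2 + 1) :=
          sliceFold_shift x t rest [x :: t.take i] (i + 1)
        rw [List.nil_append, hsh, sliceFold_acc t rest [x :: t.take i] (i + 1)]
        simp only [fSpec, if_neg hx, ← ih, altN, hs, sliceFold_cons]
        rw [List.nil_append, sliceFold_acc t rest [(t.drop 0).take (i - 0)] (i + 1)]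
        simp

-- ===== VERDICT (by name: the statement is the Claim_ definition above) =====
theorem create_subtitle_list_spec : Claim_equal_create_subtitle_list := by
  intro lines _
  unfold Spec_create_subtitle_list
  rw [A_eq_fSpec, alt_eq_altN, altN_eq_fSpec]
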